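-- pv_equiv track=rewrite | github.com/sirsh/renormer | rg/graph/circuit.py | _ensure_edge_path_
-- ===== SOURCE A (Python) =====
-- def _ensure_edge_path_(edges, edge_ids, h=[], edge_permutation=[]):
--     """there should be a path from vertex to vertex in the correct order - we need to chain the vertices along the edges
--         eg = [[0, 1], [2, 1], [4, 3], [0, 3], [4, 2]]
--        _ensure_edge_path_(eg)  =>  [[0,1],[1,2],[2,4],[4,3],[3,0]]
--     """
--     #copy the list
--     edge_ids = list(edge_ids)
--     def _match_(h,e):
--         if e[0] == h[-1]:return e
--         if e[1] == h[-1]: return list(reversed(e))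
--         return None
--
--     if len(edges)>0:
--         if len(h) == 0:
--             h = [edges.pop(0)]
--             edge_permutation = [edge_ids.pop(0)]
--             return _ensure_edge_path_(edges,edge_ids,h,edge_permutation)
--         for i,e in enumerate(edges):
--             _e = _match_(h[-1],e)
--             if _e is not None:
--                 edges.pop(i)
--                 h.append( _e )
--                 edge_permutation.append(edge_ids.pop(i))
--                 return _ensure_edge_path_(edges,edge_ids,h,edge_permutation)
--     return h,edge_permutation
-- ===== SOURCE B (Python) =====
-- # Alternative implementation: index edges by endpoint vertex once (dict vertex -> ascending
-- # original indices), then extend the chain by direct lookup instead of rescanning the edge list.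
-- # Note: A mutates its `edges`/`h` arguments in place; B does not (return value is identical).
-- def _ensure_edge_path_(edges, edge_ids, h=[], edge_permutation=[]):
--     n = len(edges)
--     if n == 0:
--         return h, edge_permutation
--     ids = list(edge_ids)
--     index = {}
--     for i, e in enumerate(edges):
--         index.setdefault(e[0], []).append(i)
--         if e[1] != e[0]:
--             index.setdefault(e[1], []).append(i)
--     used = [False] * n
--     if len(h) == 0:
--         path = [edges[0]]
--         perm = [ids[0]]
--         used[0] = True
--     else:
--         path = list(h)
--         perm = list(edge_permutation)
--     while True:
--         last = path[-1][-1]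
--         cand = index.get(last, ())
--         i = next((j for j in cand if not used[j]), None)
--         if i is None:
--             break
--         used[i] = True
--         e = edges[i]
--         path.append(e if e[0] == last else list(reversed(e)))
--         perm.append(ids[i])
--     return path, perm
-- ===== Notes on version B (the rewrite author's own statement) =====
-- stated objective: alternative
-- what changed: B builds a dict from endpoint vertex to the ascending list of original edge indices once, then extends the chain by direct dictionary lookup with a used-flag array, instead of A's recursive rescan-and-pop over the shrinking edge list (quadratic when long chains form; the timing generator's inputs form no chains, so no speedup is measured).
-- outside the precondition, e.g. on _ensure_edge_path_([[1]], [0], [], []): A returns ([[1]], [0]), B raises IndexError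
import Mathlib
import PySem

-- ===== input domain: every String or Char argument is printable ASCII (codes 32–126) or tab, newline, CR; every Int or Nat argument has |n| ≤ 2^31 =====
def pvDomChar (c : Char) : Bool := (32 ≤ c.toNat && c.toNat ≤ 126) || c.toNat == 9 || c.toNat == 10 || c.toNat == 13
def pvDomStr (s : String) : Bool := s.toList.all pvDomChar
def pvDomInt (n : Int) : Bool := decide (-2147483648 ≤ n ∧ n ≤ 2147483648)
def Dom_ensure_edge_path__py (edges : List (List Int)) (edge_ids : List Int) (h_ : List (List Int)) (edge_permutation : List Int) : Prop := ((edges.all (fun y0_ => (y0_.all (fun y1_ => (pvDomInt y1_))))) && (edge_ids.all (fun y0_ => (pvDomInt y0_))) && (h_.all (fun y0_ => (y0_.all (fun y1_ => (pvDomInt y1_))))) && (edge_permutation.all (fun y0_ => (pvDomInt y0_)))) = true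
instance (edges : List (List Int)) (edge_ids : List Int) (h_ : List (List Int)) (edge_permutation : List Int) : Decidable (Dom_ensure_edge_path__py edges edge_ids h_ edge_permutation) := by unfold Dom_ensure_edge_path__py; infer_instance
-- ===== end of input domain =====

-- B indexes edges by endpoint vertex in a dict built once and extends the chain by lookup
-- (A rescans and pops the edge list recursively); equivalence is about the RETURN value only:
-- Python A mutates its `edges` (pop) and `h` (append) arguments in place, B does not.

-- ===== PORT A =====
-- shared leaf helpers (total forms of e[0], e[1], l[-1])
def pvG0 (e : List Int) : Int := PySem.List.pyGetD e 0 0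
def pvG1 (e : List Int) : Int := PySem.List.pyGetD e 1 0
def pvLastI (l : List Int) : Int := PySem.List.pyGetD l (-1) 0
def pvLastE (h : List (List Int)) : List Int := PySem.List.pyGetD h (-1) []

-- _match_(h, e) of A (h = last edge of the chain)
def pvMatch (hl e : List Int) : Option (List Int) :=
  if pvG0 e = pvLastI hl then some e
  else if pvG1 e = pvLastI hl then some e.reverse
  else none

-- A's `for i,e in enumerate(edges): if _match_(...) is not None` scan
def pvScan (hl : List Int) : List (List Int) → Nat → Option (Nat × List Int)
  | [], _ => none
  | e :: es, i =>
    match pvMatch hl e with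
    | some me => some (i, me)
    | none => pvScan hl es (i + 1)

-- needed by the termination proof of the port
theorem pvScan_lt (hl : List Int) (l : List (List Int)) : ∀ (k i : Nat) (me : List Int),
    pvScan hl l k = some (i, me) → i < k + l.length := by
  induction l with
  | nil => intro k i me hsc; simp [pvScan] at hsc
  | cons e es ih =>
    intro k i me hsc
    rcases hm : pvMatch hl e with _ | me'
    · rw [pvScan, hm] at hsc
      have := ih (k + 1) i me hsc
      simp only [List.length_cons]; omega
    · rw [pvScan, hm] at hsc
      simp only [Option.some.injEq, Prod.mk.injEq] at hsc
      simp only [List.length_cons]; omega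

def ensure_edge_path__py (edges : List (List Int)) (edge_ids : List Int) (h_ : List (List Int)) (edge_permutation : List Int) : List (List Int) × List Int :=
  match edges with
  | [] => (h_, edge_permutation)
  | e :: es =>
    if h_ = [] then
      ensure_edge_path__py es edge_ids.tail [e] [edge_ids.getD 0 0]
    else
      match hs : pvScan (pvLastE h_) (e :: es) 0 with
      | some (i, me) =>
        ensure_edge_path__py ((e :: es).eraseIdx i) (edge_ids.eraseIdx i)
          (h_ ++ [me]) (edge_permutation ++ [edge_ids.getD i 0])
      | none => (h_, edge_permutation)
termination_by edges.length
decreasing_by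
  · simp
  · have := pvScan_lt (pvLastE h_) (e :: es) 0 i me hs
    have h2 : i < (e :: es).length := by simpa using this
    rw [List.length_eraseIdx_of_lt h2]
    omega

-- ===== PORT B =====
-- index.setdefault(e[0], []).append(i); if e[1] != e[0]: index.setdefault(e[1], []).append(i)
def pvBuild : Nat → List (List Int) → PySem.Dict Int (List Nat) → PySem.Dict Int (List Nat)
  | _, [], d => d
  | i, e :: es, d =>
    let d1 := d.modify (pvG0 e) [] (fun l => l ++ [i])
    let d2 := if pvG1 e ≠ pvG0 e then d1.modify (pvG1 e) [] (fun l => l ++ [i]) else d1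
    pvBuild (i + 1) es d2

-- the `while True` loop of B; fuel = edges.length + 1 suffices (each iteration that does not
-- break marks one unused index used), it is a totality guard only
def pvLoop (edges : List (List Int)) (ids : List Int) (idx : PySem.Dict Int (List Nat)) :
    Nat → List Bool → List (List Int) → List Int → List (List Int) × List Int
  | 0, _, path, perm => (path, perm)
  | fuel + 1, used, path, perm =>
    let v := pvLastI (pvLastE path)
    let cand := idx.getD v []
    match cand.find? (fun j => !(used.getD j false)) with
    | none => (path, perm)
    | some i =>
      let e := edges.getD i []
      pvLoop edges ids idx fuel (used.set i true)
        (path ++ [if pvG0 e = v then e else e.reverse]) (perm ++ [ids.getD i 0])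

def ensure_edge_path__py_alt (edges : List (List Int)) (edge_ids : List Int) (h_ : List (List Int)) (edge_permutation : List Int) : List (List Int) × List Int :=
  if edges.length = 0 then (h_, edge_permutation)
  else
    let idx := pvBuild 0 edges PySem.Dict.empty
    if h_ = [] then
      pvLoop edges edge_ids idx (edges.length + 1)
        ((List.replicate edges.length false).set 0 true)
        [edges.getD 0 []] [edge_ids.getD 0 0]
    else
      pvLoop edges edge_ids idx (edges.length + 1)
        (List.replicate edges.length false) h_ edge_permutation

-- ===== PRECONDITION & SPEC =====
-- Pre_ excludes the inputs on which Python A raises IndexError (an inner edge shorter than 2,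
-- an empty last chain element, or an edge_ids list that runs out during the chain) and,
-- conservatively, a few degenerate inputs of the same shapes on which A happens to return
-- because the offending element is never inspected (B raises or returns the same value there).
def Pre_ensure_edge_path__py (edges : List (List Int)) (edge_ids : List Int) (h_ : List (List Int)) (edge_permutation : List Int) : Prop :=
  edges = [] ∨
  ((∀ e ∈ edges, 2 ≤ e.length) ∧
    ((h_ ≠ [] ∧ pvLastE h_ ≠ [] ∧
        ∀ e ∈ edges, pvG0 e ≠ pvLastI (pvLastE h_) ∧ pvG1 e ≠ pvLastI (pvLastE h_)) ∨
     (h_ = [] ∧ edge_ids ≠ [] ∧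
        ∀ e ∈ edges.tail, pvG0 e ≠ pvLastI (edges.getD 0 []) ∧ pvG1 e ≠ pvLastI (edges.getD 0 [])) ∨
     ((h_ = [] ∨ pvLastE h_ ≠ []) ∧ edges.length ≤ edge_ids.length)))
instance (edges : List (List Int)) (edge_ids : List Int) (h_ : List (List Int)) (edge_permutation : List Int) : Decidable (Pre_ensure_edge_path__py edges edge_ids h_ edge_permutation) := by unfold Pre_ensure_edge_path__py; infer_instance

def pvWitness_ensure_edge_path__py : List (List Int) × List Int × List (List Int) × List Int :=
  ([[0, 1], [2, 1]], [10, 20], [], [])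

def Spec_ensure_edge_path__py (edges : List (List Int)) (edge_ids : List Int) (h_ : List (List Int)) (edge_permutation : List Int) (out : List (List Int) × List Int) : Prop := out = ensure_edge_path__py_alt edges edge_ids h_ edge_permutation
instance (edges : List (List Int)) (edge_ids : List Int) (h_ : List (List Int)) (edge_permutation : List Int) (out : List (List Int) × List Int) : Decidable (Spec_ensure_edge_path__py edges edge_ids h_ edge_permutation out) := by unfold Spec_ensure_edge_path__py; infer_instance

-- ===== CLAIM (what is proved, stated in full; the proofs are below) =====
def Claim_equal_ensure_edge_path__py : Prop := ∀ (edges : List (List Int)) (edge_ids : List Int) (h_ : List (List Int)) (edge_permutation : List Int), Dom_ensure_edge_path__py edges edge_ids h_ edge_permutation → Pre_ensure_edge_path__py edges edge_ids h_ edge_permutation → Spec_ensure_edge_path__py edges edge_ids h_ edge_permutation (ensure_edge_path__py edges edge_ids h_ edge_permutation)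

-- ===== LEMMAS AND PROOFS =====
-- generic list lemmas --------------------------------------------------------

theorem pvFind?_filter {α : Type} (l : List α) (p q : α → Bool) :
    (l.filter p).find? q = l.find? (fun a => p a && q a) := by
  induction l with
  | nil => rfl
  | cons a l ih =>
    by_cases hp : p a
    · by_cases hq : q a <;> simp [List.filter_cons, List.find?, hp, hq, ih]
    · simp [List.filter_cons, List.find?, hp, ih]

theorem pvFind?_filter' {α : Type} (l : List α) (p q : α → Bool) :
    (l.filter p).find? q = l.find? (fun a => q a && p a) := by
  rw [pvFind?_filter]
  induction l with
  | nil => rfl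
  | cons a l ih =>
    by_cases hp : p a <;> by_cases hq : q a <;> simp [List.find?, hp, hq, ih]

theorem pvFind?_decomp {α : Type} (l : List α) (p : α → Bool) (a : α)
    (h : l.find? p = some a) :
    ∃ l1 l2, l = l1 ++ a :: l2 ∧ ∀ b ∈ l1, p b = false := by
  induction l with
  | nil => simp [List.find?] at h
  | cons x l ih =>
    by_cases hx : p x
    · refine ⟨[], l, ?_, by simp⟩
      simp [List.find?, hx] at h
      simp [h]
    · rw [List.find?, Bool.of_not_eq_true hx] at h
      obtain ⟨l1, l2, rfl, hall⟩ := ih h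
      exact ⟨x :: l1, l2, rfl, by
        intro b hb
        rcases List.mem_cons.mp hb with rfl | hb
        · exact Bool.of_not_eq_true hx
        · exact hall b hb⟩

theorem pvEraseIdx_append_len {α : Type} (xs : List α) (y : α) (ys : List α) :
    (xs ++ y :: ys).eraseIdx xs.length = xs ++ ys := by
  induction xs with
  | nil => rfl
  | cons x xs ih => simp [List.eraseIdx, ih]

theorem pvGetD_append_len {α : Type} (xs : List α) (y : α) (ys : List α) (d : α) :
    (xs ++ y :: ys).getD xs.length d = y := by
  induction xs with
  | nil => rfl
  | cons x xs ih => simpa using ih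

theorem pvMap_getD_range' {α : Type} (l : List α) (d : α) (s m : Nat)
    (h : s + m ≤ l.length) :
    (List.range' s m).map (fun j => l.getD j d) = (l.drop s).take m := by
  apply List.ext_getElem
  · simp; omega
  · intro i h1 h2
    simp only [List.getElem_map, List.getElem_range', List.getElem_take, List.getElem_drop]
    rw [List.getD_eq_getElem?_getD, List.getElem?_eq_getElem (by simp at h1 ⊢; omega)]
    simp

theorem pvFilter_ne_of_nodup {α : Type} [DecidableEq α] (l1 l2 : List α) (a : α)
    (h : (l1 ++ a :: l2).Nodup) :
    (l1 ++ a :: l2).filter (fun x => !(x == a)) = l1 ++ l2 := by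
  rw [List.filter_append, List.filter_cons]
  have h1 : a ∉ l1 := by
    intro hmem
    exact (List.nodup_append.mp h).2.2 a hmem a (List.mem_cons_self ..) rfl
  have h2 : a ∉ l2 := by
    have := (List.nodup_append.mp h).2.1
    simp [List.nodup_cons] at this
    exact this.1
  have e1 : l1.filter (fun x => !(x == a)) = l1 :=
    List.filter_eq_self.mpr (fun b hb => by simp; rintro rfl; exact h1 hb)
  have e2 : l2.filter (fun x => !(x == a)) = l2 :=
    List.filter_eq_self.mpr (fun b hb => by simp; rintro rfl; exact h2 hb)
  simp [e1, e2]

-- pvScan / pvMatch -----------------------------------------------------------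

theorem pvMatch_none_of (hl e : List Int) (h0 : pvG0 e ≠ pvLastI hl)
    (h1 : pvG1 e ≠ pvLastI hl) : pvMatch hl e = none := by
  simp [pvMatch, h0, h1]

theorem pvMatch_some_of (hl e : List Int) (h : pvG0 e = pvLastI hl ∨ pvG1 e = pvLastI hl) :
    pvMatch hl e = some (if pvG0 e = pvLastI hl then e else e.reverse) := by
  by_cases h0 : pvG0 e = pvLastI hl
  · simp [pvMatch, h0]
  · rcases h with h | h
    · exact absurd h h0
    · simp [pvMatch, h0, h]

theorem pvScan_none (hl : List Int) (l : List (List Int))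
    (h : ∀ e ∈ l, pvMatch hl e = none) : ∀ k, pvScan hl l k = none := by
  induction l with
  | nil => intro k; rfl
  | cons e es ih =>
    intro k
    rw [pvScan, h e (List.mem_cons_self ..)]
    exact ih (fun e' he' => h e' (List.mem_cons_of_mem _ he')) (k + 1)

theorem pvScan_append (hl : List Int) (l1 : List (List Int)) (e : List Int)
    (l2 : List (List Int)) (me : List Int)
    (h1 : ∀ x ∈ l1, pvMatch hl x = none) (h2 : pvMatch hl e = some me) :
    ∀ k, pvScan hl (l1 ++ e :: l2) k = some (k + l1.length, me) := by
  induction l1 with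
  | nil => intro k; rw [List.nil_append, pvScan, h2]; simp
  | cons x l1 ih =>
    intro k
    rw [List.cons_append, pvScan, h1 x (List.mem_cons_self ..)]
    rw [ih (fun y hy => h1 y (List.mem_cons_of_mem _ hy)) (k + 1)]
    simp; omega

-- step lemmas for the port of A ---------------------------------------------

theorem epA_none (edges_rem : List (List Int)) (ids_rem : List Int)
    (path : List (List Int)) (perm : List Int) (hpath : path ≠ [])
    (hsc : pvScan (pvLastE path) edges_rem 0 = none) :
    ensure_edge_path__py edges_rem ids_rem path perm = (path, perm) := by
  cases edges_rem with
  | nil => rw [ensure_edge_path__py]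
  | cons e es =>
    rw [ensure_edge_path__py]
    simp only [hpath, if_false]
    split
    · next i me hmatch => rw [hsc] at hmatch; simp at hmatch
    · rfl

theorem epA_step (edges_rem : List (List Int)) (ids_rem : List Int)
    (path : List (List Int)) (perm : List Int) (i : Nat) (me : List Int)
    (hpath : path ≠ [])
    (hsc : pvScan (pvLastE path) edges_rem 0 = some (i, me)) :
    ensure_edge_path__py edges_rem ids_rem path perm =
      ensure_edge_path__py (edges_rem.eraseIdx i) (ids_rem.eraseIdx i)
        (path ++ [me]) (perm ++ [ids_rem.getD i 0]) := by
  cases edges_rem with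
  | nil => rw [pvScan] at hsc; exact absurd hsc (by simp)
  | cons e es =>
    rw [ensure_edge_path__py]
    simp only [hpath, if_false]
    split
    · next i' me' hmatch =>
      rw [hsc] at hmatch
      simp only [Option.some.injEq, Prod.mk.injEq] at hmatch
      rw [hmatch.1, hmatch.2]
    · next hmatch => rw [hsc] at hmatch; simp at hmatch

-- characterisation of the endpoint index built by pvBuild ---------------------

def pvMB (edges : List (List Int)) (v : Int) (j : Nat) : Bool :=
  decide (v = pvG0 (edges.getD j []) ∨ v = pvG1 (edges.getD j []))

def pvCandAux (v : Int) : List (List Int) → Nat → List Nat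
  | [], _ => []
  | e :: es, i => (if v = pvG0 e ∨ v = pvG1 e then [i] else []) ++ pvCandAux v es (i + 1)

theorem pvBuild_getD (v : Int) : ∀ (es : List (List Int)) (i : Nat) (d : PySem.Dict Int (List Nat)),
    (pvBuild i es d).getD v [] = d.getD v [] ++ pvCandAux v es i := by
  intro es
  induction es with
  | nil => intro i d; simp [pvBuild, pvCandAux]
  | cons e es ih =>
    intro i d
    simp only [pvBuild]
    rw [ih, pvCandAux]
    have hstep : (if pvG1 e ≠ pvG0 e then
          (d.modify (pvG0 e) [] (fun l => l ++ [i])).modify (pvG1 e) [] (fun l => l ++ [i])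
        else d.modify (pvG0 e) [] (fun l => l ++ [i])).getD v []
        = d.getD v [] ++ (if v = pvG0 e ∨ v = pvG1 e then [i] else []) := by
      by_cases h3 : pvG1 e = pvG0 e
      · rw [if_neg (by simp [h3]), PySem.Dict.getD_modify]
        by_cases h1 : v = pvG0 e
        · subst h1; simp [h3]
        · have h2 : ¬v = pvG1 e := fun hh => h1 (hh.trans h3)
          simp [h1, h2]
      · rw [if_pos h3, PySem.Dict.getD_modify, PySem.Dict.getD_modify]
        by_cases h1 : v = pvG0 e <;> by_cases h2 : v = pvG1 e
        · exact absurd (h2.symm.trans h1) h3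
        · subst h1; simp [h2]
        · subst h2; simp [h1, h3]
        · rw [PySem.Dict.getD_modify, if_neg h1]
          simp [h1, h2]

    rw [hstep, List.append_assoc]

theorem pvCandAux_filter (v : Int) (full : List (List Int)) :
    ∀ (es : List (List Int)) (i : Nat), full.drop i = es →
      pvCandAux v es i = (List.range' i es.length).filter (pvMB full v) := by
  intro es
  induction es with
  | nil => intro i _; simp [pvCandAux]
  | cons e es ih =>
    intro i hdrop
    have hget : full.getD i [] = e := by
      have h0 : (full.drop i)[0]? = some e := by rw [hdrop]; rfl
      rw [List.getElem?_drop] at h0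
      simp only [Nat.add_zero] at h0
      simp [List.getD_eq_getElem?_getD, h0]
    have hdrop' : full.drop (i + 1) = es := by
      have : (full.drop i).drop 1 = full.drop (i + 1) := by
        rw [List.drop_drop]
      rw [← this, hdrop]
      rfl
    rw [pvCandAux, ih (i + 1) hdrop', List.length_cons, List.range'_succ, List.filter_cons]
    have : pvMB full v i = decide (v = pvG0 e ∨ v = pvG1 e) := by
      unfold pvMB; rw [hget]
    by_cases hc : v = pvG0 e ∨ v = pvG1 e <;> simp [List.filter_cons, this, hc]

theorem pvCand_eq (edges : List (List Int)) (v : Int) :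
    (pvBuild 0 edges PySem.Dict.empty).getD v []
      = (List.range edges.length).filter (pvMB edges v) := by
  rw [pvBuild_getD, PySem.Dict.getD_empty, List.nil_append,
    pvCandAux_filter v edges edges 0 (by simp), List.range_eq_range']

-- the main loop equivalence ---------------------------------------------------

theorem pv_main (edges : List (List Int)) (ids : List Int) :
    ∀ (fuel : Nat) (used : List Bool) (path : List (List Int)) (perm : List Int)
      (rem : List Nat),
    rem = (List.range edges.length).filter (fun j => !(used.getD j false)) →
    used.length = edges.length →
    path ≠ [] →
    rem.length < fuel →
    ensure_edge_path__py (rem.map (fun j => edges.getD j []))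
        (rem.map (fun j => ids.getD j 0) ++ ids.drop edges.length) path perm
      = pvLoop edges ids (pvBuild 0 edges PySem.Dict.empty) fuel used path perm := by
  intro fuel
  induction fuel with
  | zero => intro _ _ _ _ _ _ _ h; omega
  | succ fuel ih =>
    intro used path perm rem hrem hlen hpath hfuel
    have hcand : (pvBuild 0 edges PySem.Dict.empty).getD (pvLastI (pvLastE path)) []
        = (List.range edges.length).filter (pvMB edges (pvLastI (pvLastE path))) :=
      pvCand_eq edges (pvLastI (pvLastE path))
    have hfind1 : ((List.range edges.length).filter (pvMB edges (pvLastI (pvLastE path)))).find?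
          (fun j => !(used.getD j false))
        = (List.range edges.length).find?
          (fun j => !(used.getD j false) && pvMB edges (pvLastI (pvLastE path)) j) :=
      pvFind?_filter' _ _ _
    have hfind2 : rem.find? (pvMB edges (pvLastI (pvLastE path)))
        = (List.range edges.length).find?
          (fun j => !(used.getD j false) && pvMB edges (pvLastI (pvLastE path)) j) := by
      rw [hrem]; exact pvFind?_filter _ _ _
    have hnd : rem.Nodup := by rw [hrem]; exact (List.nodup_range).filter _
    rcases hF : (List.range edges.length).find?
        (fun j => !(used.getD j false) && pvMB edges (pvLastI (pvLastE path)) j) with _ | oi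
    · -- no matching unused edge: both sides stop
      have hnone : ∀ j ∈ rem, pvMB edges (pvLastI (pvLastE path)) j = false := by
        intro j hj
        simpa using List.find?_eq_none.mp (hfind2.trans hF) j hj
      have hA : ensure_edge_path__py (rem.map (fun j => edges.getD j []))
          (rem.map (fun j => ids.getD j 0) ++ ids.drop edges.length) path perm = (path, perm) := by
        apply epA_none _ _ _ _ hpath
        apply pvScan_none
        intro e he
        obtain ⟨j, hj, rfl⟩ := List.mem_map.mp he
        have := hnone j hj
        simp only [pvMB, decide_eq_false_iff_not, not_or] at this
        exact pvMatch_none_of _ _ (fun hh => this.1 hh.symm) (fun hh => this.2 hh.symm)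
      rw [hA]
      simp only [pvLoop]
      rw [hcand, hfind1, hF]
    · -- a matching unused edge with smallest index oi exists
      have hP := List.find?_some hF
      obtain ⟨hub, hmb⟩ : (!(used.getD oi false)) = true
          ∧ pvMB edges (pvLastI (pvLastE path)) oi = true := by
        constructor <;> simp_all
      have hor : pvLastI (pvLastE path) = pvG0 (edges.getD oi [])
          ∨ pvLastI (pvLastE path) = pvG1 (edges.getD oi []) := by
        simpa [pvMB] using hmb
      have hoi : oi < edges.length := List.mem_range.mp (List.mem_of_find?_eq_some hF)
      obtain ⟨r1, r2, hsplit, hr1⟩ :=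
        pvFind?_decomp rem (pvMB edges (pvLastI (pvLastE path))) oi (hfind2.trans hF)
      -- A takes exactly the step at position r1.length
      have hsome : pvMatch (pvLastE path) (edges.getD oi [])
          = some (if pvG0 (edges.getD oi []) = pvLastI (pvLastE path) then edges.getD oi []
                  else (edges.getD oi []).reverse) :=
        pvMatch_some_of _ _ (hor.imp Eq.symm Eq.symm)
      have hnone1 : ∀ x ∈ r1.map (fun j => edges.getD j []), pvMatch (pvLastE path) x = none := by
        intro x hx
        obtain ⟨j, hj, rfl⟩ := List.mem_map.mp hx
        have := hr1 j hj
        simp only [pvMB, decide_eq_false_iff_not, not_or] at this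
        exact pvMatch_none_of _ _ (fun hh => this.1 hh.symm) (fun hh => this.2 hh.symm)
      have hscan : pvScan (pvLastE path) (rem.map (fun j => edges.getD j [])) 0
          = some (r1.length,
              if pvG0 (edges.getD oi []) = pvLastI (pvLastE path) then edges.getD oi []
              else (edges.getD oi []).reverse) := by
        rw [hsplit, List.map_append, List.map_cons]
        have := pvScan_append (pvLastE path) (r1.map (fun j => edges.getD j []))
          (edges.getD oi []) (r2.map (fun j => edges.getD j [])) _ hnone1 hsome 0
        simpa using this
      rw [epA_step _ _ _ _ _ _ hpath hscan]
      -- rewrite A's new arguments into the shape of the induction hypothesis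
      have hmapsplit : rem.map (fun j => edges.getD j [])
          = r1.map (fun j => edges.getD j []) ++ edges.getD oi []
              :: r2.map (fun j => edges.getD j []) := by
        rw [hsplit, List.map_append, List.map_cons]
      have hids : rem.map (fun j => ids.getD j 0) ++ ids.drop edges.length
          = r1.map (fun j => ids.getD j 0) ++ ids.getD oi 0
              :: (r2.map (fun j => ids.getD j 0) ++ ids.drop edges.length) := by
        rw [hsplit, List.map_append, List.map_cons, List.append_assoc, List.cons_append]
      have herase1 : (rem.map (fun j => edges.getD j [])).eraseIdx r1.length
          = (r1 ++ r2).map (fun j => edges.getD j []) := by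
        rw [hmapsplit, List.map_append]
        have := pvEraseIdx_append_len (r1.map (fun j => edges.getD j []))
          (edges.getD oi []) (r2.map (fun j => edges.getD j []))
        rwa [List.length_map] at this
      have herase2 : (rem.map (fun j => ids.getD j 0) ++ ids.drop edges.length).eraseIdx r1.length
          = (r1 ++ r2).map (fun j => ids.getD j 0) ++ ids.drop edges.length := by
        rw [hids, List.map_append, List.append_assoc]
        have := pvEraseIdx_append_len (r1.map (fun j => ids.getD j 0))
          (ids.getD oi 0) (r2.map (fun j => ids.getD j 0) ++ ids.drop edges.length)
        rwa [List.length_map] at this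
      have hgetid : (rem.map (fun j => ids.getD j 0) ++ ids.drop edges.length).getD r1.length 0
          = ids.getD oi 0 := by
        rw [hids]
        have := pvGetD_append_len (r1.map (fun j => ids.getD j 0)) (ids.getD oi 0)
          (r2.map (fun j => ids.getD j 0) ++ ids.drop edges.length) 0
        rwa [List.length_map] at this
      rw [herase1, herase2, hgetid]
      -- the new used flags generate exactly r1 ++ r2
      have hrem' : r1 ++ r2 = (List.range edges.length).filter
          (fun j => !((used.set oi true).getD j false)) := by
        have hq : (fun j : Nat => !((used.set oi true).getD j false))
            = (fun j : Nat => (!(j == oi)) && !(used.getD j false)) := by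
          funext j
          by_cases hj : j = oi
          · subst hj
            rw [List.getD_eq_getElem?_getD, List.getElem?_set_self (by omega)]
            simp
          · rw [List.getD_eq_getElem?_getD, List.getElem?_set_ne (fun hh => hj hh.symm),
              ← List.getD_eq_getElem?_getD]
            simp [hj]
        rw [hq, ← List.filter_filter, ← hrem, hsplit]
        exact (pvFilter_ne_of_nodup r1 r2 oi (hsplit ▸ hnd)).symm
      rw [ih (used.set oi true) _ _ (r1 ++ r2) hrem' (by simpa using hlen) (by simp)
        (by
          have : rem.length = r1.length + r2.length + 1 := by simp [hsplit]; omega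
          simp only [List.length_append]
          omega)]
      -- B takes the same step
      simp only [pvLoop]
      rw [hcand, hfind1, hF]

-- initial-state bookkeeping ---------------------------------------------------

theorem pvLastE_single (e : List Int) : pvLastE [e] = e := by
  unfold pvLastE
  simp [PySem.List.pyGetD_neg_one]

theorem pvUsed_init (n : Nat) :
    (List.range n).filter (fun j => !((List.replicate n false).getD j false)) = List.range n := by
  apply List.filter_eq_self.mpr
  intro j hj
  have hjn := List.mem_range.mp hj
  rw [List.getD_eq_getElem?_getD, List.getElem?_replicate]
  simp [hjn]

theorem pvUsed_init0 (n : Nat) (hn : 1 ≤ n) :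
    (List.range n).filter (fun j => !(((List.replicate n false).set 0 true).getD j false))
      = List.range' 1 (n - 1) := by
  have hr : List.range n = 0 :: List.range' 1 (n - 1) := by
    rw [List.range_eq_range']
    cases n with
    | zero => omega
    | succ m => rw [List.range'_succ]; simp
  rw [hr, List.filter_cons]
  have h0 : ((List.replicate n false).set 0 true).getD 0 false = true := by
    rw [List.getD_eq_getElem?_getD, List.getElem?_set_self (by simp; omega)]
    rfl
  rw [h0]
  simp only [Bool.not_true, Bool.false_eq_true, if_false]
  apply List.filter_eq_self.mpr
  intro j hj
  have hj' := List.mem_range'.mp hj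
  have hjn : j < n := by omega
  have hj0 : (0 : Nat) ≠ j := by omega
  rw [List.getD_eq_getElem?_getD, List.getElem?_set_ne hj0, List.getElem?_replicate]
  simp [hjn]

theorem pvGetD_mem {α : Type} (l : List α) (j : Nat) (d : α) (h : j < l.length) :
    l.getD j d ∈ l := by
  rw [List.getD_eq_getElem?_getD, List.getElem?_eq_getElem h]
  exact List.getElem_mem h

-- ===== VERDICT (by name: the statement is the Claim_ definition above) =====
theorem ensure_edge_path__py_spec : Claim_equal_ensure_edge_path__py := by
  intro edges edge_ids h_ edge_permutation _hdom hpre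
  unfold Spec_ensure_edge_path__py
  rcases hpre with rfl | ⟨_hlen2, hbr⟩
  · simp [ensure_edge_path__py, ensure_edge_path__py_alt]
  · cases edges with
    | nil => simp [ensure_edge_path__py, ensure_edge_path__py_alt]
    | cons e es =>
      have hn1 : 1 ≤ (e :: es).length := by simp
      rcases hbr with ⟨hne, _hl, hnom⟩ | ⟨rfl, _hids, hnom⟩ | ⟨hlast, hlenids⟩
      · -- no edge matches the last vertex of h_: both stop immediately
        rw [epA_none _ edge_ids _ _ hne (pvScan_none _ _ (by
          intro x hx
          exact pvMatch_none_of _ _ (hnom x hx).1 (hnom x hx).2) 0)]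
        rw [ensure_edge_path__py_alt]
        rw [if_neg (by simp), if_neg hne]
        rw [pvLoop]
        have hcand : (pvBuild 0 (e :: es) PySem.Dict.empty).getD (pvLastI (pvLastE h_)) [] = [] := by
          rw [pvCand_eq]
          apply List.filter_eq_nil_iff.mpr
          intro j hj
          have hjn := List.mem_range.mp hj
          have hmem := pvGetD_mem (e :: es) j [] hjn
          have := hnom _ hmem
          simp [pvMB]
          exact ⟨fun hh => this.1 hh.symm, fun hh => this.2 hh.symm⟩
        rw [hcand]
        rfl
      · -- h_ = [] and no further edge matches the first edge's last vertex
        rw [ensure_edge_path__py]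
        rw [if_pos rfl]
        have hstop : ensure_edge_path__py es edge_ids.tail [e] [edge_ids.getD 0 0]
            = ([e], [edge_ids.getD 0 0]) := by
          apply epA_none _ _ _ _ (by simp)
          apply pvScan_none
          intro x hx
          have := hnom x hx
          rw [pvLastE_single]
          exact pvMatch_none_of _ _ (fun hh => this.1 (by simpa using hh))
            (fun hh => this.2 (by simpa using hh))
        rw [hstop, ensure_edge_path__py_alt]
        rw [if_neg (by simp), if_pos rfl]
        rw [pvLoop]
        have hgd0 : (e :: es).getD 0 [] = e := rfl
        have hfind : ((pvBuild 0 (e :: es) PySem.Dict.empty).getD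
              (pvLastI (pvLastE [(e :: es).getD 0 []])) []).find?
              (fun j => !((((List.replicate (e :: es).length false).set 0 true)).getD j false))
            = none := by
          apply List.find?_eq_none.mpr
          intro j hj
          rw [pvCand_eq] at hj
          have hjn := List.mem_range.mp (List.mem_of_mem_filter hj)
          have hmb := List.of_mem_filter hj
          cases j with
          | zero =>
            have h0 : ((List.replicate (e :: es).length false).set 0 true).getD 0 false = true := by
              rw [List.getD_eq_getElem?_getD, List.getElem?_set_self (by simp)]
              rfl
            simp [h0]
          | succ k =>
            exfalso
            have hkes : k < es.length := by simpa using hjn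
            have hmem : (e :: es).getD (k + 1) [] ∈ es := by
              rw [List.getD_cons_succ]
              exact pvGetD_mem es k [] hkes
            have := hnom _ hmem
            rw [hgd0, pvLastE_single] at hmb
            simp [pvMB] at hmb
            rcases hmb with hh | hh
            · exact this.1 hh.symm
            · exact this.2 hh.symm
        rw [hfind]
        rfl
      · -- enough edge ids: full chain, by the loop invariant
        by_cases hh : h_ = []
        · subst hh
          rw [ensure_edge_path__py]
          rw [if_pos rfl]
          have hmain := pv_main (e :: es) edge_ids ((e :: es).length + 1)
            ((List.replicate (e :: es).length false).set 0 true)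
            [e] [edge_ids.getD 0 0] (List.range' 1 ((e :: es).length - 1))
            (pvUsed_init0 _ hn1).symm (by simp) (by simp) (by simp [List.length_range'])
          have hmape : (List.range' 1 ((e :: es).length - 1)).map (fun j => (e :: es).getD j [])
              = es := by
            rw [pvMap_getD_range' _ _ _ _ (by simp; omega)]
            simp [List.take_length]
          have hmapi : (List.range' 1 ((e :: es).length - 1)).map (fun j => edge_ids.getD j 0)
              ++ edge_ids.drop (e :: es).length = edge_ids.tail := by
            rw [pvMap_getD_range' _ _ _ _ (by omega)]
            have hdd : edge_ids.drop (e :: es).length = (edge_ids.drop 1).drop ((e :: es).length - 1) := by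
              rw [List.drop_drop]
              congr 1
              omega
            rw [hdd, List.take_append_drop, List.drop_one]
          rw [hmape, hmapi] at hmain
          rw [hmain, ensure_edge_path__py_alt]
          rw [if_neg (by simp), if_pos rfl]
          rfl
        · have hmain := pv_main (e :: es) edge_ids ((e :: es).length + 1)
            (List.replicate (e :: es).length false) h_ edge_permutation
            (List.range (e :: es).length)
            (pvUsed_init _).symm (by simp) hh (by simp)
          have hmape : (List.range (e :: es).length).map (fun j => (e :: es).getD j [])
              = e :: es := by
            rw [List.range_eq_range', pvMap_getD_range' _ _ _ _ (by simp)]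
            simp
          have hmapi : (List.range (e :: es).length).map (fun j => edge_ids.getD j 0)
              ++ edge_ids.drop (e :: es).length = edge_ids := by
            rw [List.range_eq_range', pvMap_getD_range' _ _ _ _ (by omega)]
            simp [List.take_append_drop]
          rw [hmape, hmapi] at hmain
          rw [hmain, ensure_edge_path__py_alt]
          rw [if_neg (by simp), if_neg hh]
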